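-- pv_equiv track=rewrite | github.com/tusharrparab/Phylloscopus_Genexpression | bin/build_reference_manifest.py | choose_primary
-- ===== SOURCE A (Python) =====
-- from typing import Dict, List, Optional
--
-- ASSEMBLY_LEVEL_RANK = {
--     "Complete Genome": 0,
--     "Chromosome": 1,
--     "Scaffold": 2,
--     "Contig": 3,
--     "": 99,
-- }
--
-- def sort_key(row: Dict[str, str]):
--     has_local_annotation = bool((row.get("annotation_gtf") or "").strip())
--     has_local_transcriptome = bool(
--         (row.get("transcriptome_fasta") or row.get("transcript_fasta") or "").strip()
--     )
--     has_local_assembly = bool((row.get("assembly_fasta") or "").strip())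
--     level = (row.get("assembly_level") or "").strip()
--     level_rank = ASSEMBLY_LEVEL_RANK.get(level, 99)
--     assembly_count = int((row.get("ncbi_assembly_count") or "0").strip() or 0)
--     return (
--         0 if has_local_annotation and (has_local_assembly or has_local_transcriptome) else 1,
--         0 if has_local_transcriptome else 1,
--         0 if has_local_assembly else 1,
--         level_rank,
--         -assembly_count,
--         row.get("scientific_name", "").strip(),
--     )
--
-- def choose_primary(candidates: List[Dict[str, str]], preferred: str) -> Optional[Dict[str, str]]:
--     if not candidates:
--         return None
--
--     if preferred:
--         preferred_norm = preferred.strip().lower()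
--         for row in candidates:
--             if row.get("scientific_name", "").strip().lower() == preferred_norm:
--                 return row
--             if row.get("species_id", "").strip().lower() == preferred_norm:
--                 return row
--
--     ordered = sorted(candidates, key=sort_key)
--     return ordered[0]
-- ===== SOURCE B (Python) =====
-- ASSEMBLY_LEVELS = ("Complete Genome", "Chromosome", "Scaffold", "Contig")
--
--
-- def _field(row, key):
--     return (row.get(key) or "").strip()
--
--
-- def _crit_annotation(row):
--     # 0 iff a local annotation plus either a local assembly or transcriptome exists
--     if _field(row, "annotation_gtf") and (
--         _field(row, "assembly_fasta") or _crit_transcriptome(row) == 0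
--     ):
--         return 0
--     return 1
--
--
-- def _crit_transcriptome(row):
--     s = row.get("transcriptome_fasta") or row.get("transcript_fasta") or ""
--     return 0 if s.strip() else 1
--
--
-- def _crit_assembly(row):
--     return 0 if _field(row, "assembly_fasta") else 1
--
--
-- def _crit_level(row):
--     level = _field(row, "assembly_level")
--     return ASSEMBLY_LEVELS.index(level) if level in ASSEMBLY_LEVELS else 99
--
--
-- def _crit_count(row):
--     return -int(_field(row, "ncbi_assembly_count") or 0)
--
--
-- def _name(row):
--     return row.get("scientific_name", "").strip()
--
--
-- def choose_primary(candidates, preferred):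
--     if not candidates:
--         return None
--     if preferred:
--         norm = preferred.strip().lower()
--         for row in candidates:
--             if _name(row).lower() == norm or row.get("species_id", "").strip().lower() == norm:
--                 return row
--     # cascading narrowing: keep only the rows that are best under each criterion in turn
--     pool = list(candidates)
--     for crit in (_crit_annotation, _crit_transcriptome, _crit_assembly, _crit_level, _crit_count):
--         best = min(crit(r) for r in pool)
--         pool = [r for r in pool if crit(r) == best]
--     best_name = min(_name(r) for r in pool)
--     pool = [r for r in pool if _name(r) == best_name]
--     return pool[0]
-- ===== Notes on version B (the rewrite author's own statement) =====
-- stated objective: alternative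
-- what changed: B replaces A's single sort by a composite 6-tuple key with cascading narrowing passes: starting from the whole candidate list it computes, for one criterion at a time (annotation+data flag, transcriptome flag, assembly flag, assembly-level rank, negated NCBI count, scientific name), the best value over the current pool and keeps only the rows achieving it, returning the first survivor; counts are only parsed for rows still in the pool.
import Mathlib
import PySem

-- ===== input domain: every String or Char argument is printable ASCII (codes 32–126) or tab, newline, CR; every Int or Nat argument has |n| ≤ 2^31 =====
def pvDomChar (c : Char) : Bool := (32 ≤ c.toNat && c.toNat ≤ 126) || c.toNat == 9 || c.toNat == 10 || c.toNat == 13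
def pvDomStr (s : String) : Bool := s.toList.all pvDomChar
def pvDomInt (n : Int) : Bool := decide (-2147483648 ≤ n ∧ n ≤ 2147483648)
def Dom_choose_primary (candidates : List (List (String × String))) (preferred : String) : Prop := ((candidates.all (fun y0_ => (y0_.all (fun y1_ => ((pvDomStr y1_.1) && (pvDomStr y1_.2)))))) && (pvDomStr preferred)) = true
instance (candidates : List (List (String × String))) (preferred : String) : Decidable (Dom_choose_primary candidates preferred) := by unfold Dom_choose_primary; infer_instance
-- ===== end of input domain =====

-- B replaces A's sort by a composite key with cascading narrowing passes (best value per criterion,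
-- keep only the achievers, head of the final pool); equivalence is about the RETURN value (neither mutates).

-- Python's '<' on the 6-tuple (int, int, int, int, int, str) sort keys, written out component by
-- component (exact: strict lexicographic comparison; PySem has no order instance for 6-tuples).
def pvTupleLt : (Int × Int × Int × Int × Int × String) → (Int × Int × Int × Int × Int × String) → Bool
  | (a1, a2, a3, a4, a5, a6), (b1, b2, b3, b4, b5, b6) =>
    if a1 < b1 then true else if b1 < a1 then false
    else if a2 < b2 then true else if b2 < a2 then false
    else if a3 < b3 then true else if b3 < a3 then false
    else if a4 < b4 then true else if b4 < a4 then false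
    else if a5 < b5 then true else if b5 < a5 then false
    else a6 < b6

-- ===== PORT A =====

-- row.get(k) or "" / row.get(k, "") : first-match association-list lookup, "" when missing
def pvGetS (row : List (String × String)) (k : String) : String := (List.lookup k row).getD ""

def pvLevelRank : PySem.Dict String Int :=
  PySem.Dict.ofList [("Complete Genome", 0), ("Chromosome", 1), ("Scaffold", 2), ("Contig", 3), ("", 99)]

-- (row.get("ncbi_assembly_count") or "0").strip()
def pvCountStrA (row : List (String × String)) : String :=
  PySem.Str.strip (let s := pvGetS row "ncbi_assembly_count"; if s = "" then "0" else s)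

-- int(t or 0); Python raises ValueError where ofStr? is none — those inputs are outside Pre_
def pvCountA (row : List (String × String)) : Int :=
  let t := pvCountStrA row
  if t = "" then 0 else (PySem.Int.ofStr? t).getD 0

def sort_key (row : List (String × String)) : Int × Int × Int × Int × Int × String :=
  let has_local_annotation : Bool := PySem.Str.strip (pvGetS row "annotation_gtf") != ""
  let has_local_transcriptome : Bool :=
    PySem.Str.strip (let s := pvGetS row "transcriptome_fasta";
                     if s = "" then pvGetS row "transcript_fasta" else s) != ""
  let has_local_assembly : Bool := PySem.Str.strip (pvGetS row "assembly_fasta") != ""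
  let level := PySem.Str.strip (pvGetS row "assembly_level")
  let level_rank := pvLevelRank.getD level 99
  let assembly_count := pvCountA row
  ((if has_local_annotation && (has_local_assembly || has_local_transcriptome) then 0 else 1),
   (if has_local_transcriptome then 0 else 1),
   (if has_local_assembly then 0 else 1),
   level_rank,
   -assembly_count,
   PySem.Str.strip (pvGetS row "scientific_name"))

-- the 'for row in candidates: if … return row; if … return row' loop
def pvPrefScanA : List (List (String × String)) → String → Option (List (String × String))
  | [], _ => none
  | row :: rest, norm =>
    if PySem.Str.lower (PySem.Str.strip (pvGetS row "scientific_name")) = norm then some row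
    else if PySem.Str.lower (PySem.Str.strip (pvGetS row "species_id")) = norm then some row
    else pvPrefScanA rest norm

-- sorted(candidates, key=sort_key): PySem.List.sorted's own algorithm (cf. sorted_eq_foldl_insertBy),
-- spelled out because the tuple key needs pvTupleLt rather than an LT-instance; exact and stable.
def pvSortedA (candidates : List (List (String × String))) : List (List (String × String)) :=
  candidates.foldl
    (fun acc x => PySem.List.insertBy (fun a b => pvTupleLt (sort_key a) (sort_key b)) x acc) []

def choose_primary (candidates : List (List (String × String))) (preferred : String) : Option (List (String × String)) :=
  if candidates = [] then none
  else
    match (if preferred ≠ "" then pvPrefScanA candidates (PySem.Str.lower (PySem.Str.strip preferred)) else none) with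
    | some row => some row
    | none => (pvSortedA candidates).head?   -- ordered = sorted(...); ordered[0] (candidates ≠ [])

-- ===== PORT B =====

def pvLevelsB : List String := ["Complete Genome", "Chromosome", "Scaffold", "Contig"]

-- _field(row, key) = (row.get(key) or "").strip()
def pvFieldB (row : List (String × String)) (k : String) : String :=
  PySem.Str.strip ((List.lookup k row).getD "")

-- _crit_transcriptome
def pvCritTr (row : List (String × String)) : Int :=
  let s := (let t := (List.lookup "transcriptome_fasta" row).getD "";
            if t = "" then (List.lookup "transcript_fasta" row).getD "" else t)
  if PySem.Str.strip s ≠ "" then 0 else 1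

-- _crit_annotation
def pvCritAnn (row : List (String × String)) : Int :=
  if pvFieldB row "annotation_gtf" ≠ "" ∧
     (pvFieldB row "assembly_fasta" ≠ "" ∨ pvCritTr row = 0) then 0 else 1

-- _crit_assembly
def pvCritAsm (row : List (String × String)) : Int :=
  if pvFieldB row "assembly_fasta" ≠ "" then 0 else 1

-- _crit_level: tuple index when the level is listed, else 99
def pvCritLevel (row : List (String × String)) : Int :=
  let level := pvFieldB row "assembly_level"
  if level ∈ pvLevelsB then (((PySem.List.index? pvLevelsB level).getD 0 : Nat) : Int) else 99

-- _crit_count = -int(_field(row, "ncbi_assembly_count") or 0); int() raises outside Pre_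
def pvCritCount (row : List (String × String)) : Int :=
  -(let t := pvFieldB row "ncbi_assembly_count";
    if t = "" then 0 else (PySem.Int.ofStr? t).getD 0)

-- _name
def pvNameB (row : List (String × String)) : String :=
  PySem.Str.strip ((List.lookup "scientific_name" row).getD "")

-- one narrowing pass: best = min(crit(r) for r in pool); pool = [r for r in pool if crit(r) == best]
def pvStageB (crit : List (String × String) → Int) (pool : List (List (String × String))) : List (List (String × String)) :=
  let best := (PySem.List.min? (pool.map crit) (fun v => v)).getD 0   -- pool is never empty here
  pool.filter (fun r => crit r == best)

-- the final pass on the scientific name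
def pvNameStageB (pool : List (List (String × String))) : List (List (String × String)) :=
  let best := (PySem.List.min? (pool.map pvNameB) (fun v => v)).getD ""
  pool.filter (fun r => pvNameB r == best)

-- the 'for crit in (...)' loop followed by the name pass
def pvCascadeB (candidates : List (List (String × String))) : List (List (String × String)) :=
  pvNameStageB
    ([pvCritAnn, pvCritTr, pvCritAsm, pvCritLevel, pvCritCount].foldl
      (fun pool crit => pvStageB crit pool) candidates)

-- the preference loop, one combined test per row
def pvPrefScanB : List (List (String × String)) → String → Option (List (String × String))
  | [], _ => none
  | row :: rest, norm =>
    if PySem.Str.lower (pvNameB row) = norm ∨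
       PySem.Str.lower (PySem.Str.strip ((List.lookup "species_id" row).getD "")) = norm
    then some row else pvPrefScanB rest norm

def choose_primary_alt (candidates : List (List (String × String))) (preferred : String) : Option (List (String × String)) :=
  if candidates = [] then none
  else
    match (if preferred ≠ "" then pvPrefScanB candidates (PySem.Str.lower (PySem.Str.strip preferred)) else none) with
    | some row => some row
    | none => (pvCascadeB candidates).head?   -- return pool[0] (pool nonempty since candidates ≠ [])

-- ===== PRECONDITION & SPEC =====
-- Pre_ excludes exactly the inputs where A raises ValueError: a non-empty candidate list, no
-- preference hit, and some row whose stripped ncbi_assembly_count is non-empty yet not int()-parseable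
-- (A parses every row's count; B only parses surviving rows, so B may return where A raises).
def Pre_choose_primary (candidates : List (List (String × String))) (preferred : String) : Prop :=
  candidates = [] ∨
  (preferred ≠ "" ∧ ∃ row ∈ candidates,
     PySem.Str.lower (PySem.Str.strip ((List.lookup "scientific_name" row).getD "")) = PySem.Str.lower (PySem.Str.strip preferred) ∨
     PySem.Str.lower (PySem.Str.strip ((List.lookup "species_id" row).getD "")) = PySem.Str.lower (PySem.Str.strip preferred)) ∨
  (∀ row ∈ candidates,
     (PySem.Str.strip (let s := (List.lookup "ncbi_assembly_count" row).getD ""; if s = "" then "0" else s)) = "" ∨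
     (PySem.Int.ofStr? (PySem.Str.strip (let s := (List.lookup "ncbi_assembly_count" row).getD ""; if s = "" then "0" else s))).isSome = true)
instance (candidates : List (List (String × String))) (preferred : String) : Decidable (Pre_choose_primary candidates preferred) := by unfold Pre_choose_primary; infer_instance

def pvWitness_choose_primary : (List (List (String × String))) × String :=
  ([[("scientific_name", "Abc"), ("ncbi_assembly_count", " 7 ")], [("species_id", "x")]], "")

def Spec_choose_primary (candidates : List (List (String × String))) (preferred : String) (out : Option (List (String × String))) : Prop := out = choose_primary_alt candidates preferred
instance (candidates : List (List (String × String))) (preferred : String) (out : Option (List (String × String))) : Decidable (Spec_choose_primary candidates preferred out) := by unfold Spec_choose_primary; infer_instance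

-- ===== CLAIM (what is proved, stated in full; the proofs are below) =====
def Claim_equal_choose_primary : Prop := ∀ (candidates : List (List (String × String))) (preferred : String), Dom_choose_primary candidates preferred → Pre_choose_primary candidates preferred → Spec_choose_primary candidates preferred (choose_primary candidates preferred)

-- ===== LEMMAS AND PROOFS =====

-- Boolean strict comparison with a single, fixed instance path (keeps rewriting predictable)
def pvLtB {K : Type} [LinearOrder K] (x y : K) : Bool := decide (x < y)

-- first element of a list whose key is minimal (proof-side yardstick both ports are measured against)
def pvFirstMinK {α K : Type} [LinearOrder K] (k : α → K) : List α → Option α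
  | [] => none
  | x :: xs =>
    match pvFirstMinK k xs with
    | none => some x
    | some m => if k m < k x then some m else some x

-- the minimum VALUE of a list of keys
def pvMinV {K : Type} [LinearOrder K] : List K → Option K
  | [] => none
  | x :: xs =>
    match pvMinV xs with
    | none => some x
    | some m => some (min x m)

theorem pvFirstMinK_eq_none_iff {α K : Type} [LinearOrder K] (k : α → K) (xs : List α) :
    pvFirstMinK k xs = none ↔ xs = [] := by
  cases xs with
  | nil => simp [pvFirstMinK]
  | cons x t =>
    simp only [pvFirstMinK]
    cases pvFirstMinK k t with
    | none => simp
    | some m => by_cases h : k m < k x <;> simp [h]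

theorem pvMinV_eq_none_iff {K : Type} [LinearOrder K] (xs : List K) :
    pvMinV xs = none ↔ xs = [] := by
  cases xs with
  | nil => simp [pvMinV]
  | cons x t => simp only [pvMinV]; cases pvMinV t <;> simp

theorem pvMinV_spec {K : Type} [LinearOrder K] :
    ∀ (xs : List K) (m : K), pvMinV xs = some m → m ∈ xs ∧ ∀ y ∈ xs, m ≤ y
  | [], m => by simp [pvMinV]
  | x :: t, m => by
    simp only [pvMinV]
    cases ht : pvMinV t with
    | none =>
      have : t = [] := (pvMinV_eq_none_iff t).mp ht
      subst this
      intro h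
      simp_all
    | some mt =>
      intro h
      obtain ⟨hmem, hlb⟩ := pvMinV_spec t mt ht
      have hm : m = min x mt := by simpa using h.symm
      subst hm
      constructor
      · rcases le_total x mt with hle | hle
        · simp [min_eq_left hle]
        · simp [min_eq_right hle, hmem]
      · intro y hy
        rcases List.mem_cons.mp hy with rfl | hy
        · exact min_le_left _ _
        · exact le_trans (min_le_right _ _) (hlb y hy)

theorem pvMinV_eq_some {K : Type} [LinearOrder K] (xs : List K) (m : K)
    (hmem : m ∈ xs) (hlb : ∀ y ∈ xs, m ≤ y) : pvMinV xs = some m := by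
  cases h : pvMinV xs with
  | none =>
    rw [pvMinV_eq_none_iff] at h
    subst h
    simp at hmem
  | some m' =>
    obtain ⟨hmem', hlb'⟩ := pvMinV_spec xs m' h
    have : m = m' := le_antisymm (hlb m' hmem') (hlb' m hmem)
    rw [this]

-- the running-minimum recursion spelled out as find?-of-the-minimum-key
theorem pvFirstMinK_eq_find? {α K : Type} [LinearOrder K] (k : α → K) :
    ∀ (xs : List α) (m : K), pvMinV (xs.map k) = some m →
      pvFirstMinK k xs = xs.find? (fun x => decide (k x = m))
  | [], m => by simp [pvMinV]
  | x :: t, m => by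
    simp only [List.map_cons, pvMinV]
    cases ht : pvMinV (t.map k) with
    | none =>
      have : t = [] := by simpa using (pvMinV_eq_none_iff (t.map k)).mp ht
      subst this
      intro h
      have hm : m = k x := by simpa using h.symm
      subst hm
      simp [pvFirstMinK, List.find?]
    | some mt =>
      intro h
      have hm : m = min (k x) mt := by simpa using h.symm
      subst hm
      have IH := pvFirstMinK_eq_find? k t mt ht
      have htne : t ≠ [] := by
        intro h0; subst h0; simp [pvMinV] at ht
      obtain ⟨e, he⟩ : ∃ e, pvFirstMinK k t = some e := by
        cases h0 : pvFirstMinK k t with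
        | none => exact absurd ((pvFirstMinK_eq_none_iff k t).mp h0) htne
        | some e => exact ⟨e, rfl⟩
      have hke : k e = mt := by
        have := List.find?_some (he ▸ IH ▸ rfl : t.find? (fun x => decide (k x = mt)) = some e)
        simpa using this
      by_cases hlt : mt < k x
      · rw [min_eq_right (le_of_lt hlt)]
        have hkx : ¬ (k x = mt) := by intro h0; rw [h0] at hlt; exact lt_irrefl _ hlt
        have hfind : List.find? (fun y => decide (k y = mt)) (x :: t) =
            List.find? (fun y => decide (k y = mt)) t := by
          simp [hkx]
        rw [hfind, ← IH]
        show (match pvFirstMinK k t with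
              | none => some x
              | some m => if k m < k x then some m else some x) = pvFirstMinK k t
        have hex : k e < k x := by rw [hke]; exact hlt
        rw [he]
        show (if k e < k x then some e else some x) = some e
        rw [if_pos hex]
      · have hle : k x ≤ mt := le_of_not_gt hlt
        rw [min_eq_left hle]
        have hnlt : ¬ (k e < k x) := by
          rw [hke]; exact fun h0 => absurd (lt_of_le_of_lt hle h0) (lt_irrefl _)
        show (match pvFirstMinK k t with
              | none => some x
              | some m => if k m < k x then some m else some x) =
            List.find? (fun y => decide (k y = k x)) (x :: t)
        rw [he]
        show (if k e < k x then some e else some x) =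
            List.find? (fun y => decide (k y = k x)) (x :: t)
        rw [if_neg hnlt]
        simp

-- the lexicographic minimum is the staged minimum: first minimise f, then g among the f-minimal rows
theorem pvMinV_lex {ρ A B : Type} [LinearOrder A] [LinearOrder B]
    (f : ρ → A) (g : ρ → B) (xs : List ρ) (m1 : A) (m2 : B)
    (h1 : pvMinV (xs.map f) = some m1)
    (h2 : pvMinV ((xs.filter (fun r => decide (f r = m1))).map g) = some m2) :
    pvMinV (xs.map (fun r => toLex (f r, g r))) = some (toLex (m1, m2)) := by
  obtain ⟨hmem2, hlb2⟩ := pvMinV_spec _ _ h2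
  obtain ⟨hmem1, hlb1⟩ := pvMinV_spec _ _ h1
  obtain ⟨r0, hr0f, hr0g⟩ := List.mem_map.mp hmem2
  have hr0 : r0 ∈ xs ∧ f r0 = m1 := by
    have := List.mem_filter.mp hr0f
    simpa using this
  apply pvMinV_eq_some
  · exact List.mem_map.mpr ⟨r0, hr0.1, by rw [hr0.2, hr0g]⟩
  · intro y hy
    obtain ⟨r, hr, rfl⟩ := List.mem_map.mp hy
    have hf : m1 ≤ f r := hlb1 _ (List.mem_map.mpr ⟨r, hr, rfl⟩)
    rcases lt_or_eq_of_le hf with hlt | heq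
    · exact Prod.Lex.toLex_le_toLex.mpr (Or.inl hlt)
    · refine Prod.Lex.toLex_le_toLex.mpr (Or.inr ⟨heq, ?_⟩)
      have hrF : r ∈ xs.filter (fun r => decide (f r = m1)) :=
        List.mem_filter.mpr ⟨hr, by simp [heq.symm]⟩
      exact hlb2 _ (List.mem_map.mpr ⟨r, hrF, rfl⟩)

-- one narrowing stage: the first lex-minimal row is the first g-minimal row among the f-minimal ones
theorem pvFirstMinK_stage {ρ A B : Type} [LinearOrder A] [LinearOrder B]
    (f : ρ → A) (g : ρ → B) (xs : List ρ) (m1 : A)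
    (h1 : pvMinV (xs.map f) = some m1) :
    pvFirstMinK (fun r => toLex (f r, g r)) xs =
      pvFirstMinK g (xs.filter (fun r => decide (f r = m1))) := by
  obtain ⟨hmem1, _⟩ := pvMinV_spec _ _ h1
  obtain ⟨r0, hr0, hr0f⟩ := List.mem_map.mp hmem1
  have hFne : xs.filter (fun r => decide (f r = m1)) ≠ [] := by
    have : r0 ∈ xs.filter (fun r => decide (f r = m1)) :=
      List.mem_filter.mpr ⟨hr0, by simp [hr0f]⟩
    intro h0; rw [h0] at this; simp at this
  obtain ⟨m2, h2⟩ : ∃ m2, pvMinV ((xs.filter (fun r => decide (f r = m1))).map g) = some m2 := by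
    cases h0 : pvMinV ((xs.filter (fun r => decide (f r = m1))).map g) with
    | none =>
      rw [pvMinV_eq_none_iff, List.map_eq_nil_iff] at h0
      exact absurd h0 hFne
    | some m2 => exact ⟨m2, rfl⟩
  have hfl : xs.filter (fun r => decide (toLex (f r, g r) = toLex (m1, m2))) =
      (xs.filter (fun r => decide (f r = m1))).filter (fun r => decide (g r = m2)) := by
    rw [List.filter_filter]
    apply List.filter_congr
    intro r _
    show (decide (toLex (f r, g r) = toLex (m1, m2))) = (decide (g r = m2) && decide (f r = m1))
    by_cases hf : f r = m1 <;> by_cases hg : g r = m2 <;>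
      simp [hf, hg, toLex_inj, Prod.ext_iff]
  rw [pvFirstMinK_eq_find? _ xs _ (pvMinV_lex f g xs m1 m2 h1 h2),
      pvFirstMinK_eq_find? g _ m2 h2, ← List.head?_filter, ← List.head?_filter, hfl]

-- the left-to-right running-minimum fold computes pvFirstMinK
theorem pvFoldlMin_eq {α K : Type} [LinearOrder K] (k : α → K) :
    ∀ (xs : List α) (o : Option α),
      xs.foldl (fun o x =>
        match o with
        | none => some x
        | some m => if pvLtB (k x) (k m) then some x else some m) o =
      (match o with
       | none => pvFirstMinK k xs
       | some b =>
         match pvFirstMinK k xs with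
         | none => some b
         | some m => if k m < k b then some m else some b)
  | [], o => by cases o <;> rfl
  | x :: t, o => by
    have IHx := pvFoldlMin_eq k t (some x)
    simp only [pvLtB] at IHx ⊢
    cases o with
    | none =>
      simp only [List.foldl_cons]
      rw [IHx]
      cases ht : pvFirstMinK k t with
      | none => simp [pvFirstMinK, ht]
      | some m => simp [pvFirstMinK, ht]
    | some b =>
      have IHb := pvFoldlMin_eq k t (some b)
      simp only [pvLtB] at IHb
      simp only [List.foldl_cons]
      by_cases hxb : k x < k b
      · simp only [hxb, decide_true, if_pos]
        rw [IHx]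
        simp only [pvFirstMinK]
        cases ht : pvFirstMinK k t with
        | none => simp [hxb]
        | some m =>
          by_cases hmx : k m < k x
          · have hmb : k m < k b := lt_trans hmx hxb
            simp [hmx, hmb]
          · simp [hmx, hxb]
      · simp only [hxb, decide_false, Bool.false_eq_true, if_neg, not_false_eq_true]
        rw [IHb]
        simp only [pvFirstMinK]
        cases ht : pvFirstMinK k t with
        | none => simp [hxb]
        | some m =>
          by_cases hmx : k m < k x
          · simp [hmx]
          · have hbm : ¬ (k m < k b) :=
              not_lt.mpr (le_trans (le_of_not_gt hxb) (le_of_not_gt hmx))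
            simp [hmx, hxb, hbm]

-- the nested key the proofs run on
def pvK6 (r : List (String × String)) : String := pvNameB r
def pvK5 (r : List (String × String)) : Int ×ₗ String := toLex (pvCritCount r, pvK6 r)
def pvK4 (r : List (String × String)) : Int ×ₗ (Int ×ₗ String) := toLex (pvCritLevel r, pvK5 r)
def pvK3 (r : List (String × String)) : Int ×ₗ (Int ×ₗ (Int ×ₗ String)) := toLex (pvCritAsm r, pvK4 r)
def pvK2 (r : List (String × String)) : Int ×ₗ (Int ×ₗ (Int ×ₗ (Int ×ₗ String))) := toLex (pvCritTr r, pvK3 r)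
def pvK1 (r : List (String × String)) : Int ×ₗ (Int ×ₗ (Int ×ₗ (Int ×ₗ (Int ×ₗ String)))) := toLex (pvCritAnn r, pvK2 r)

theorem pv_level_rank_eq (lv : String) :
    (if lv ∈ pvLevelsB then (((PySem.List.index? pvLevelsB lv).getD 0 : Nat) : Int) else 99) =
      pvLevelRank.getD lv 99 := by
  by_cases h1 : lv = "Complete Genome"
  · subst h1; decide
  by_cases h2 : lv = "Chromosome"
  · subst h2; decide
  by_cases h3 : lv = "Scaffold"
  · subst h3; decide
  by_cases h4 : lv = "Contig"
  · subst h4; decide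
  have e1 : ("Complete Genome" == lv) = false := beq_eq_false_iff_ne.mpr (fun h => h1 h.symm)
  have e2 : ("Chromosome" == lv) = false := beq_eq_false_iff_ne.mpr (fun h => h2 h.symm)
  have e3 : ("Scaffold" == lv) = false := beq_eq_false_iff_ne.mpr (fun h => h3 h.symm)
  have e4 : ("Contig" == lv) = false := beq_eq_false_iff_ne.mpr (fun h => h4 h.symm)
  have e5 : ("" == lv) = false ∨ lv = "" := by
    by_cases h5 : lv = ""
    · exact Or.inr h5
    · exact Or.inl (beq_eq_false_iff_ne.mpr (fun h => h5 h.symm))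
  have hmem : lv ∉ pvLevelsB := by simp [pvLevelsB, h1, h2, h3, h4]
  rw [if_neg hmem]
  rcases e5 with e5 | e5
  · simp [pvLevelRank, PySem.Dict.ofList, PySem.Dict.update, PySem.Dict.insert, PySem.Dict.empty,
      PySem.Dict.getD, PySem.Dict.get?, PySem.Dict.contains, List.find?, e1, e2, e3, e4, e5]
  · subst e5; decide

-- B strips before the 'or 0' where A substitutes "0" before stripping; the parsed value is the same
theorem pv_count_eq (r : List (String × String)) : pvCritCount r = -(pvCountA r) := by
  unfold pvCritCount pvCountA pvCountStrA pvFieldB pvGetS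
  by_cases hc : (List.lookup "ncbi_assembly_count" r).getD "" = ""
  · simp only [hc]
    decide
  · simp [hc]

-- B's criteria are the components of A's sort key
theorem pv_sort_key_eq (r : List (String × String)) :
    sort_key r = (pvCritAnn r, pvCritTr r, pvCritAsm r, pvCritLevel r, pvCritCount r, pvK6 r) := by
  have hcount := pv_count_eq r
  simp only [sort_key, pvCritAnn, pvCritTr, pvCritAsm, pvCritLevel, pvK6, pvNameB,
    pvFieldB, pvGetS, pv_level_rank_eq, ← hcount]
  by_cases ha : PySem.Str.strip ((List.lookup "annotation_gtf" r).getD "") = "" <;>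
  by_cases ht : PySem.Str.strip (let s := (List.lookup "transcriptome_fasta" r).getD "";
                  if s = "" then (List.lookup "transcript_fasta" r).getD "" else s) = "" <;>
  by_cases hs : PySem.Str.strip ((List.lookup "assembly_fasta" r).getD "") = "" <;>
    simp [ha, ht, hs]

-- nested-lex reading of pvTupleLt, level by level
theorem pv_nestLt (x1 x2 x3 x4 x5 : Int) (x6 : String) (y1 y2 y3 y4 y5 : Int) (y6 : String) :
    pvTupleLt (x1, x2, x3, x4, x5, x6) (y1, y2, y3, y4, y5, y6) =
      pvLtB (toLex (x1, toLex (x2, toLex (x3, toLex (x4, toLex (x5, x6))))))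
            (toLex (y1, toLex (y2, toLex (y3, toLex (y4, toLex (y5, y6)))))) := by
  simp only [pvTupleLt, pvLtB]
  rcases lt_trichotomy x1 y1 with h1 | h1 | h1
  · simp [h1, Prod.Lex.toLex_lt_toLex]
  · subst h1
    simp only [lt_irrefl, if_false]
    rcases lt_trichotomy x2 y2 with h2 | h2 | h2
    · simp [h2, Prod.Lex.toLex_lt_toLex]
    · subst h2
      simp only [lt_irrefl, if_false]
      rcases lt_trichotomy x3 y3 with h3 | h3 | h3
      · simp [h3, Prod.Lex.toLex_lt_toLex]
      · subst h3
        simp only [lt_irrefl, if_false]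
        rcases lt_trichotomy x4 y4 with h4 | h4 | h4
        · simp [h4, Prod.Lex.toLex_lt_toLex]
        · subst h4
          simp only [lt_irrefl, if_false]
          rcases lt_trichotomy x5 y5 with h5 | h5 | h5
          · simp [h5, Prod.Lex.toLex_lt_toLex]
          · subst h5
            simp [Prod.Lex.toLex_lt_toLex]
          · have hlt : ¬ x5 < y5 := not_lt_of_gt h5
            have hne : ¬ x5 = y5 := (ne_of_lt h5).symm
            simp [h5, hlt, hne, Prod.Lex.toLex_lt_toLex]
        · have hlt : ¬ x4 < y4 := not_lt_of_gt h4
          have hne : ¬ x4 = y4 := (ne_of_lt h4).symm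
          simp [h4, hlt, hne, Prod.Lex.toLex_lt_toLex]
      · have hlt : ¬ x3 < y3 := not_lt_of_gt h3
        have hne : ¬ x3 = y3 := (ne_of_lt h3).symm
        simp [h3, hlt, hne, Prod.Lex.toLex_lt_toLex]
    · have hlt : ¬ x2 < y2 := not_lt_of_gt h2
      have hne : ¬ x2 = y2 := (ne_of_lt h2).symm
      simp [h2, hlt, hne, Prod.Lex.toLex_lt_toLex]
  · have hlt : ¬ x1 < y1 := not_lt_of_gt h1
    have hne : ¬ x1 = y1 := (ne_of_lt h1).symm
    simp [h1, hlt, hne, Prod.Lex.toLex_lt_toLex]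

-- A's tuple comparison on sort keys is the nested-lex order on pvK1
theorem pv_tupleLt_eq_K1 (a b : List (String × String)) :
    pvTupleLt (sort_key a) (sort_key b) = pvLtB (pvK1 a) (pvK1 b) := by
  rw [pv_sort_key_eq a, pv_sort_key_eq b, pv_nestLt]
  rfl

-- head of A's insertion sort = running minimum = pvFirstMinK pvK1
theorem pv_insertBy_head? {α : Type} (before : α → α → Bool) (x : α) (acc : List α) :
    (PySem.List.insertBy before x acc).head? =
      (match acc.head? with
       | none => some x
       | some m => if before x m then some x else some m) := by
  cases acc with
  | nil => rfl
  | cons y ys => by_cases h : before x y <;> simp [PySem.List.insertBy, h]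

theorem pv_foldl_insertBy_head? {α : Type} (before : α → α → Bool) :
    ∀ (xs acc : List α),
      (xs.foldl (fun a x => PySem.List.insertBy before x a) acc).head? =
        xs.foldl (fun o x =>
          match o with
          | none => some x
          | some m => if before x m then some x else some m) acc.head?
  | [], _ => rfl
  | x :: xs, acc => by
    simp only [List.foldl_cons]
    rw [pv_foldl_insertBy_head? before xs (PySem.List.insertBy before x acc), pv_insertBy_head?]

theorem pv_sortedA_head? (candidates : List (List (String × String))) :
    (pvSortedA candidates).head? = pvFirstMinK pvK1 candidates := by
  unfold pvSortedA
  rw [pv_foldl_insertBy_head?]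
  simp only [pv_tupleLt_eq_K1, List.head?_nil]
  rw [pvFoldlMin_eq pvK1 candidates none]

-- PySem's min over a nonempty list of values is pvMinV
theorem pv_foldl_min_eq_pvMinV {K : Type} [LinearOrder K] :
    ∀ (t : List K) (x : K), pvMinV (x :: t) = some (t.foldl min x)
  | [], x => rfl
  | y :: t, x => by
    have IH := pv_foldl_min_eq_pvMinV t y
    have swap : ∀ (t : List K) (a b : K), min a (t.foldl min b) = t.foldl min (min a b) := by
      intro t
      induction t with
      | nil => intro a b; rfl
      | cons c t ih =>
        intro a b
        simp only [List.foldl_cons]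
        rw [ih a (min b c), min_assoc]
    show (match pvMinV (y :: t) with
          | none => some x
          | some m => some (min x m)) = some ((y :: t).foldl min x)
    rw [IH]
    simp only [List.foldl_cons]
    rw [swap t x y]

theorem pv_min?_eq_pvMinV {K : Type} [LinearOrder K] (xs : List K) (hne : xs ≠ []) :
    PySem.List.min? xs (fun v => v) = pvMinV xs := by
  cases xs with
  | nil => exact absurd rfl hne
  | cons x t => rw [PySem.List.min?_id_cons, pv_foldl_min_eq_pvMinV]

-- one port stage, rephrased through pvMinV (pool nonempty)
theorem pv_stageB_eq (crit : List (String × String) → Int) (pool : List (List (String × String)))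
    (m : Int) (hm : pvMinV (pool.map crit) = some m) :
    pvStageB crit pool = pool.filter (fun r => decide (crit r = m)) := by
  have hne : pool ≠ [] := by
    intro h0; subst h0; simp [pvMinV] at hm
  have hne' : pool.map crit ≠ [] := by simpa using hne
  unfold pvStageB
  rw [pv_min?_eq_pvMinV _ hne', hm]
  apply List.filter_congr
  intro r _
  show (crit r == m) = decide (crit r = m)
  by_cases h : crit r = m <;> simp [h]

theorem pv_nameStageB_eq (pool : List (List (String × String)))
    (m : String) (hm : pvMinV (pool.map pvNameB) = some m) :
    pvNameStageB pool = pool.filter (fun r => decide (pvNameB r = m)) := by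
  have hne : pool ≠ [] := by
    intro h0; subst h0; simp [pvMinV] at hm
  have hne' : pool.map pvNameB ≠ [] := by simpa using hne
  unfold pvNameStageB
  rw [pv_min?_eq_pvMinV _ hne', hm]
  apply List.filter_congr
  intro r _
  show (pvNameB r == m) = decide (pvNameB r = m)
  by_cases h : pvNameB r = m <;> simp [h]

-- a pool's minimum exists and the stage keeps it nonempty
theorem pv_pool_min_exists {ρ K : Type} [LinearOrder K] (k : ρ → K) (pool : List ρ) (hne : pool ≠ []) :
    ∃ m, pvMinV (pool.map k) = some m := by
  cases h0 : pvMinV (pool.map k) with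
  | none =>
    rw [pvMinV_eq_none_iff, List.map_eq_nil_iff] at h0
    exact absurd h0 hne
  | some m => exact ⟨m, rfl⟩

theorem pv_filter_min_ne_nil {ρ K : Type} [LinearOrder K] (k : ρ → K) (pool : List ρ)
    (m : K) (hm : pvMinV (pool.map k) = some m) :
    pool.filter (fun r => decide (k r = m)) ≠ [] := by
  obtain ⟨hmem, _⟩ := pvMinV_spec _ _ hm
  obtain ⟨r0, hr0, hr0k⟩ := List.mem_map.mp hmem
  have : r0 ∈ pool.filter (fun r => decide (k r = m)) :=
    List.mem_filter.mpr ⟨hr0, by simp [hr0k]⟩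
  intro h0; rw [h0] at this; simp at this

-- the whole cascade: its head is the first pvK1-minimal row
theorem pv_cascadeB_head? (candidates : List (List (String × String))) (hne : candidates ≠ []) :
    (pvCascadeB candidates).head? = pvFirstMinK pvK1 candidates := by
  obtain ⟨m1, h1⟩ := pv_pool_min_exists pvCritAnn candidates hne
  have P1 := candidates.filter (fun r => decide (pvCritAnn r = m1))
  have e1 : pvStageB pvCritAnn candidates = candidates.filter (fun r => decide (pvCritAnn r = m1)) :=
    pv_stageB_eq _ _ _ h1
  have n1 := pv_filter_min_ne_nil pvCritAnn candidates m1 h1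
  obtain ⟨m2, h2⟩ := pv_pool_min_exists pvCritTr _ n1
  have e2 := pv_stageB_eq pvCritTr _ _ h2
  have n2 := pv_filter_min_ne_nil pvCritTr _ m2 h2
  obtain ⟨m3, h3⟩ := pv_pool_min_exists pvCritAsm _ n2
  have e3 := pv_stageB_eq pvCritAsm _ _ h3
  have n3 := pv_filter_min_ne_nil pvCritAsm _ m3 h3
  obtain ⟨m4, h4⟩ := pv_pool_min_exists pvCritLevel _ n3
  have e4 := pv_stageB_eq pvCritLevel _ _ h4
  have n4 := pv_filter_min_ne_nil pvCritLevel _ m4 h4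
  obtain ⟨m5, h5⟩ := pv_pool_min_exists pvCritCount _ n4
  have e5 := pv_stageB_eq pvCritCount _ _ h5
  have n5 := pv_filter_min_ne_nil pvCritCount _ m5 h5
  obtain ⟨m6, h6⟩ := pv_pool_min_exists pvNameB _ n5
  have e6 := pv_nameStageB_eq _ _ h6
  unfold pvCascadeB
  simp only [List.foldl_cons, List.foldl_nil]
  rw [e1, e2, e3, e4, e5, e6]
  -- right side: peel the lex key level by level
  have s1 : pvFirstMinK pvK1 candidates =
      pvFirstMinK pvK2 (candidates.filter (fun r => decide (pvCritAnn r = m1))) :=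
    pvFirstMinK_stage pvCritAnn pvK2 candidates m1 h1
  have s2 : pvFirstMinK pvK2 (candidates.filter (fun r => decide (pvCritAnn r = m1))) =
      pvFirstMinK pvK3 ((candidates.filter (fun r => decide (pvCritAnn r = m1))).filter
        (fun r => decide (pvCritTr r = m2))) :=
    pvFirstMinK_stage pvCritTr pvK3 _ m2 h2
  have s3 : pvFirstMinK pvK3 ((candidates.filter (fun r => decide (pvCritAnn r = m1))).filter
        (fun r => decide (pvCritTr r = m2))) =
      pvFirstMinK pvK4 (((candidates.filter (fun r => decide (pvCritAnn r = m1))).filter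
        (fun r => decide (pvCritTr r = m2))).filter (fun r => decide (pvCritAsm r = m3))) :=
    pvFirstMinK_stage pvCritAsm pvK4 _ m3 h3
  have s4 : pvFirstMinK pvK4 (((candidates.filter (fun r => decide (pvCritAnn r = m1))).filter
        (fun r => decide (pvCritTr r = m2))).filter (fun r => decide (pvCritAsm r = m3))) =
      pvFirstMinK pvK5 ((((candidates.filter (fun r => decide (pvCritAnn r = m1))).filter
        (fun r => decide (pvCritTr r = m2))).filter (fun r => decide (pvCritAsm r = m3))).filter
        (fun r => decide (pvCritLevel r = m4))) :=
    pvFirstMinK_stage pvCritLevel pvK5 _ m4 h4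
  have s5 : pvFirstMinK pvK5 ((((candidates.filter (fun r => decide (pvCritAnn r = m1))).filter
        (fun r => decide (pvCritTr r = m2))).filter (fun r => decide (pvCritAsm r = m3))).filter
        (fun r => decide (pvCritLevel r = m4))) =
      pvFirstMinK pvK6 (((((candidates.filter (fun r => decide (pvCritAnn r = m1))).filter
        (fun r => decide (pvCritTr r = m2))).filter (fun r => decide (pvCritAsm r = m3))).filter
        (fun r => decide (pvCritLevel r = m4))).filter (fun r => decide (pvCritCount r = m5))) :=
    pvFirstMinK_stage pvCritCount pvK6 _ m5 h5
  have s6 := pvFirstMinK_eq_find? pvK6 _ m6 h6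
  rw [s1, s2, s3, s4, s5, s6, List.head?_filter]
  rfl

-- the two preference scans agree
theorem pv_prefScan_eq (norm : String) :
    ∀ xs : List (List (String × String)), pvPrefScanA xs norm = pvPrefScanB xs norm
  | [] => rfl
  | row :: rest => by
    have IH := pv_prefScan_eq norm rest
    simp only [pvPrefScanA, pvPrefScanB, pvNameB, pvGetS]
    by_cases h1 : PySem.Str.lower (PySem.Str.strip ((List.lookup "scientific_name" row).getD "")) = norm
    · simp [h1]
    · by_cases h2 : PySem.Str.lower (PySem.Str.strip ((List.lookup "species_id" row).getD "")) = norm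
      · simp [h1, h2]
      · simp [h1, h2, IH]

-- ===== VERDICT (by name: the statement is the Claim_ definition above) =====
theorem choose_primary_spec : Claim_equal_choose_primary := by
  intro candidates preferred _ _
  unfold Spec_choose_primary choose_primary choose_primary_alt
  by_cases hnil : candidates = []
  · simp [hnil]
  · simp only [if_neg hnil]
    rw [pv_prefScan_eq (PySem.Str.lower (PySem.Str.strip preferred)) candidates]
    have hmin : (pvSortedA candidates).head? = (pvCascadeB candidates).head? := by
      rw [pv_sortedA_head? candidates, pv_cascadeB_head? candidates hnil]
    by_cases hp : preferred = ""
    · subst hp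
      simp only [ne_eq, not_true_eq_false, if_false]
      exact hmin
    · rw [if_pos hp]
      cases h : pvPrefScanB candidates _ with
      | none => simp [hmin]
      | some r => simp
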